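-- pv_equiv track=rewrite | github.com/GaryNg-R/TenPython | run.py | getmostvisited
-- ===== SOURCE A (Python) =====
-- def getmostvisited(n, sprints):
--     arr = [0]*(n+2)
--     for i in range(len(sprints)-1):
--         start = min(sprints[i], sprints[i+1])
--         end = max(sprints[i], sprints[i+1])
--         arr[start] += 1
--         arr[end + 1] -= 1
--     ans = -1
--     s = 0
--     maxi = -1
--     for i in range(1, n+1):
--         arr[i] += s
--         s = arr[i]
--         if s > maxi:
--             maxi = s
--             ans = i
--
--     return ans
-- ===== SOURCE B (Python) =====
-- def getmostvisited(n, sprints):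
--     cnt = [0] * (n + 2)
--     for i in range(len(sprints) - 1):
--         start = min(sprints[i], sprints[i + 1])
--         end = max(sprints[i], sprints[i + 1])
--         for r in range(start, end + 1):
--             cnt[r] += 1
--     ans = -1
--     maxi = -1
--     for i in range(1, n + 1):
--         if cnt[i] > maxi:
--             maxi = cnt[i]
--             ans = i
--     return ans
-- ===== Notes on version B (the rewrite author's own statement) =====
-- stated objective: simpler
-- what changed: Replaces A's difference-array boundary marking followed by a destructive prefix-sum-and-maximum sweep with the direct strategy: increment a counts array once per room actually covered by each adjacent sprint pair, then take the first room with the strictly largest count in a pure read-only scan.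
-- outside the precondition, e.g. on getmostvisited(3, [0, 0]): A returns -1, B returns 1; on getmostvisited(3, [-5, -5]): A returns -1, B returns 1; on getmostvisited(3, [-2, 3]): A returns 3, B returns 3
import Mathlib
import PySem

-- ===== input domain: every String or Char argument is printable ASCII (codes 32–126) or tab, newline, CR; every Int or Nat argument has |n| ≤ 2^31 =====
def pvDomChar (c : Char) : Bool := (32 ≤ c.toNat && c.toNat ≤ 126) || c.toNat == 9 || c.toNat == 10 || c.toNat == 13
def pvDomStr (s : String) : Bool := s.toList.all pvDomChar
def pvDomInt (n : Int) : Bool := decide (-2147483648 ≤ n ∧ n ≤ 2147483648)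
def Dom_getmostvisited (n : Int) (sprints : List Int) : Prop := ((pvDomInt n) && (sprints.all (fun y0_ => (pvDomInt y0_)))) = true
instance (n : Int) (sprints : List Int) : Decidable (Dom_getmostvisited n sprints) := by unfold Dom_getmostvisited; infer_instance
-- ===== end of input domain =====

-- B replaces A's difference-array boundary marking + in-place prefix-sum sweep by directly
-- filling a counts array (one increment per covered room) and a pure maximum scan; objective: simpler.

-- ===== PORT A =====
-- Python `arr[i] += d` (exact incl. negative-index wrap; out-of-range = IndexError lies outside Pre_)
def pyBump (arr : List Int) (i : Int) (d : Int) : List Int :=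
  PySem.List.pySetD arr i (PySem.List.pyGetD arr i 0 + d)

-- body of A's first loop: mark interval boundaries in the difference array
def stepDiff (sprints : List Int) (arr : List Int) (i : Int) : List Int :=
  let a := PySem.List.pyGetD sprints i 0
  let b := PySem.List.pyGetD sprints (i + 1) 0
  let start := min a b
  let e := max a b
  pyBump (pyBump arr start 1) (e + 1) (-1)

-- body of A's second loop over state (arr, ans, s, maxi)
def stepScanA (st : List Int × Int × Int × Int) (i : Int) : List Int × Int × Int × Int :=
  let arr := st.1
  let ans := st.2.1
  let s := st.2.2.1
  let maxi := st.2.2.2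
  let v := PySem.List.pyGetD arr i 0 + s        -- arr[i] += s
  let arr' := PySem.List.pySetD arr i v
  if v > maxi then (arr', i, v, v) else (arr', ans, v, maxi)

def getmostvisited (n : Int) (sprints : List Int) : Int :=
  let arr0 : List Int := List.replicate (n + 2).toNat 0
  let arr1 := (PySem.List.pyRange 0 ((sprints.length : Int) - 1) 1).foldl (stepDiff sprints) arr0
  ((PySem.List.pyRange 1 (n + 1) 1).foldl stepScanA (arr1, -1, 0, -1)).2.1

-- ===== PORT B =====
-- body of B's first loop: `for r in range(start, end + 1): cnt[r] += 1`
def stepFill (sprints : List Int) (cnt : List Int) (i : Int) : List Int :=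
  let start := min (PySem.List.pyGetD sprints i 0) (PySem.List.pyGetD sprints (i + 1) 0)
  let e := max (PySem.List.pyGetD sprints i 0) (PySem.List.pyGetD sprints (i + 1) 0)
  (PySem.List.pyRange start (e + 1) 1).foldl (fun cnt r => pyBump cnt r 1) cnt

-- body of B's second loop over state (ans, maxi): cnt is only read
def stepScanB (cnt : List Int) (st : Int × Int) (i : Int) : Int × Int :=
  if PySem.List.pyGetD cnt i 0 > st.2 then (i, PySem.List.pyGetD cnt i 0) else st

def getmostvisited_alt (n : Int) (sprints : List Int) : Int :=
  let cnt0 : List Int := List.replicate (n + 2).toNat 0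
  let cnt := (PySem.List.pyRange 0 ((sprints.length : Int) - 1) 1).foldl (stepFill sprints) cnt0
  ((PySem.List.pyRange 1 (n + 1) 1).foldl (stepScanB cnt) (-1, -1)).1

-- ===== PRECONDITION & SPEC =====
-- Pre_ keeps the function's natural domain: at most one sprint entry, or n ≥ 0 with every
-- entry a room id in 1..n.  It excludes lists of ≥ 2 entries containing an id outside 1..n
-- (or a negative n with such a list): there A either raises IndexError or returns an
-- accidental value produced by Python's negative-index wraparound / a write at index 0.
def Pre_getmostvisited (n : Int) (sprints : List Int) : Prop :=
  sprints.length ≤ 1 ∨ (0 ≤ n ∧ ∀ x ∈ sprints, 1 ≤ x ∧ x ≤ n)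
instance (n : Int) (sprints : List Int) : Decidable (Pre_getmostvisited n sprints) := by
  unfold Pre_getmostvisited; infer_instance

def pvWitness_getmostvisited : Int × List Int := (4, [1, 3, 2, 4])

def Spec_getmostvisited (n : Int) (sprints : List Int) (out : Int) : Prop := out = getmostvisited_alt n sprints
instance (n : Int) (sprints : List Int) (out : Int) : Decidable (Spec_getmostvisited n sprints out) := by unfold Spec_getmostvisited; infer_instance

-- ===== CLAIM (what is proved, stated in full; the proofs are below) =====
def Claim_equal_getmostvisited : Prop := ∀ (n : Int) (sprints : List Int), Dom_getmostvisited n sprints → Pre_getmostvisited n sprints → Spec_getmostvisited n sprints (getmostvisited n sprints)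

-- ===== LEMMAS AND PROOFS =====

theorem pyGetD_nonneg_getD (arr : List Int) (i : Int) (h0 : 0 ≤ i) :
    PySem.List.pyGetD arr i 0 = arr.getD i.toNat 0 := by
  have he : i = ((i.toNat : Nat) : Int) := (Int.toNat_of_nonneg h0).symm
  conv_lhs => rw [he]
  rw [PySem.List.pyGetD_natCast]

theorem pySetD_eq_set (arr : List Int) (i v : Int) (h0 : 0 ≤ i) :
    PySem.List.pySetD arr i v = arr.set i.toNat v := by
  have he : i = ((i.toNat : Nat) : Int) := (Int.toNat_of_nonneg h0).symm
  conv_lhs => rw [he]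
  simp [pysem]
  congr 1
  omega

-- sum of arr[1..k]
def pref (arr : List Int) : Nat → Int
  | 0 => 0
  | k + 1 => pref arr k + arr.getD (k + 1) 0

theorem getD_set_self (arr : List Int) (m : Nat) (v : Int) (h : m < arr.length) :
    (arr.set m v).getD m 0 = v := by
  simp [List.getD, h]

theorem getD_set_other (arr : List Int) (m j : Nat) (v : Int) (h : j ≠ m) :
    (arr.set m v).getD j 0 = arr.getD j 0 := by
  simp only [List.getD, List.getElem?_set]
  rw [if_neg (fun hh => h hh.symm)]

theorem getD_bump (arr : List Int) (i : Int) (d : Int) (j : Nat) (h0 : 0 ≤ i) (h2 : i < (arr.length : Int)) :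
    (pyBump arr i d).getD j 0 = arr.getD j 0 + (if (j : Int) = i then d else 0) := by
  unfold pyBump
  rw [pySetD_eq_set arr i _ h0, pyGetD_nonneg_getD arr i h0]
  by_cases h : j = i.toNat
  · subst h
    rw [getD_set_self arr _ _ (by omega), if_pos (by omega)]
  · rw [getD_set_other arr _ _ _ h, if_neg (by omega)]
    ring

theorem length_pyBump (arr : List Int) (i d : Int) (h1 : 0 ≤ i) : (pyBump arr i d).length = arr.length := by
  unfold pyBump
  rw [pySetD_eq_set arr i _ h1]
  simp

theorem pref_set (arr : List Int) (m : Nat) (v : Int) (hm1 : 1 ≤ m) (hm2 : m < arr.length) :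
    ∀ k : Nat, pref (arr.set m v) k = pref arr k + (if m ≤ k then v - arr.getD m 0 else 0) := by
  intro k
  induction k with
  | zero => simp [pref]; omega
  | succ k ih =>
      by_cases h : m = k + 1
      · subst h
        simp only [pref, ih, getD_set_self arr (k+1) v hm2]
        rw [if_neg (by omega), if_pos (by omega)]
        ring
      · simp only [pref, ih, getD_set_other arr m (k+1) v (fun hh => h hh.symm)]
        by_cases h2 : m ≤ k
        · rw [if_pos h2, if_pos (by omega)]; ring
        · rw [if_neg h2, if_neg (by omega)]; ring

theorem pref_bump (arr : List Int) (i d : Int) (k : Nat) (h1 : 1 ≤ i) (h2 : i < (arr.length : Int)) :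
    pref (pyBump arr i d) k = pref arr k + (if i ≤ (k : Int) then d else 0) := by
  unfold pyBump
  rw [pySetD_eq_set arr i _ (by omega), pyGetD_nonneg_getD arr i (by omega)]
  rw [pref_set arr i.toNat _ (by omega) (by omega) k]
  by_cases hik : i ≤ (k : Int)
  · rw [if_pos (by omega : i.toNat ≤ k), if_pos hik]
    ring
  · rw [if_neg (by omega : ¬ i.toNat ≤ k), if_neg hik]

theorem pref_replicate (N k : Nat) : pref (List.replicate N (0 : Int)) k = 0 := by
  induction k with
  | zero => rfl
  | succ k ih => simp [pref, ih, List.getD]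

-- B's inner fill loop, pointwise: each room in [s, e] gains one visit
theorem getD_fill (N : Nat) (e : Int) (he : e + 1 < (N : Int)) (j : Nat) :
    ∀ (k : Nat) (s : Int), s = e + 1 - (k : Int) → 1 ≤ s →
      ∀ cnt : List Int, cnt.length = N →
        ((PySem.List.pyRange s (e + 1) 1).foldl (fun cnt r => pyBump cnt r 1) cnt).getD j 0
          = cnt.getD j 0 + (if s ≤ (j : Int) ∧ (j : Int) ≤ e then 1 else 0) := by
  intro k
  induction k with
  | zero =>
      intro s hs h1 cnt hlen
      rw [PySem.List.pyRange_one_eq_nil (by omega : e + 1 ≤ s)]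
      rw [if_neg (by omega)]
      simp
  | succ k ih =>
      intro s hs h1 cnt hlen
      rw [PySem.List.pyRange_one_cons (by omega : s < e + 1)]
      simp only [List.foldl_cons]
      rw [ih (s + 1) (by omega) (by omega) (pyBump cnt s 1)
            (by rw [length_pyBump _ _ _ (by omega)]; exact hlen)]
      rw [getD_bump cnt s 1 j (by omega) (by omega)]
      split_ifs <;> omega

theorem length_fill (e : Int) : ∀ (k : Nat) (s : Int), s = e + 1 - (k : Int) → 1 ≤ s →
    ∀ cnt : List Int,
      ((PySem.List.pyRange s (e + 1) 1).foldl (fun cnt r => pyBump cnt r 1) cnt).length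
        = cnt.length := by
  intro k
  induction k with
  | zero =>
      intro s hs _ cnt
      rw [PySem.List.pyRange_one_eq_nil (by omega : e + 1 ≤ s)]
      rfl
  | succ k ih =>
      intro s hs h1 cnt
      rw [PySem.List.pyRange_one_cons (by omega : s < e + 1)]
      simp only [List.foldl_cons]
      rw [ih (s + 1) (by omega) (by omega), length_pyBump _ _ _ (by omega)]

-- over the shared index list, A's prefix sums track B's direct counts
theorem phase1 (n : Int) (sprints : List Int) (r : Int) (hr1 : 1 ≤ r) (_hrn : r ≤ n) :
    ∀ (L : List Int),
      (∀ i ∈ L,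
        (1 ≤ PySem.List.pyGetD sprints i 0 ∧ PySem.List.pyGetD sprints i 0 ≤ n) ∧
        (1 ≤ PySem.List.pyGetD sprints (i+1) 0 ∧ PySem.List.pyGetD sprints (i+1) 0 ≤ n)) →
      ∀ (arr cnt : List Int), (arr.length : Int) = n + 2 → (cnt.length : Int) = n + 2 →
        pref (L.foldl (stepDiff sprints) arr) r.toNat + cnt.getD r.toNat 0
          = pref arr r.toNat + (L.foldl (stepFill sprints) cnt).getD r.toNat 0 := by
  intro L
  induction L with
  | nil => intro _ arr cnt _ _; simp
  | cons i L ih =>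
      intro hmem arr cnt hlen hlenc
      obtain ⟨⟨ha1, ha2⟩, ⟨hb1, hb2⟩⟩ := hmem i (List.mem_cons_self)
      set a := PySem.List.pyGetD sprints i 0 with hadef
      set b := PySem.List.pyGetD sprints (i+1) 0 with hbdef
      have hstep : pref (stepDiff sprints arr i) r.toNat
          = pref arr r.toNat + (if min a b ≤ r ∧ r ≤ max a b then 1 else 0) := by
        unfold stepDiff
        rw [pref_bump _ _ _ _ (by omega : 1 ≤ max a b + 1)
              (by rw [length_pyBump arr _ _ (by omega)]; omega)]
        rw [pref_bump _ _ _ _ (by omega : 1 ≤ min a b) (by omega)]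
        have hcast : ((r.toNat : Nat) : Int) = r := by omega
        rw [hcast]
        have : min a b ≤ max a b := by omega
        split_ifs <;> omega
      have hfill : (stepFill sprints cnt i).getD r.toNat 0
          = cnt.getD r.toNat 0 + (if min a b ≤ r ∧ r ≤ max a b then 1 else 0) := by
        unfold stepFill
        rw [← hadef, ← hbdef]
        rw [getD_fill cnt.length (max a b) (by omega) r.toNat
              (max a b + 1 - min a b).toNat (min a b) (by omega) (by omega) cnt rfl]
        have hcast : ((r.toNat : Nat) : Int) = r := by omega
        rw [hcast]
      have hlen' : ((stepDiff sprints arr i).length : Int) = n + 2 := by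
        unfold stepDiff
        rw [length_pyBump _ _ _ (by omega), length_pyBump _ _ _ (by omega)]
        exact hlen
      have hlenc' : ((stepFill sprints cnt i).length : Int) = n + 2 := by
        unfold stepFill
        rw [← hadef, ← hbdef]
        rw [length_fill (max a b) (max a b + 1 - min a b).toNat (min a b) (by omega) (by omega) cnt]
        exact hlenc
      simp only [List.foldl_cons]
      have hih := ih (fun j hj => hmem j (List.mem_cons_of_mem i hj))
        (stepDiff sprints arr i) (stepFill sprints cnt i) hlen' hlenc'
      linarith [hih, hstep, hfill]

theorem pref_succ (arr : List Int) (i : Int) (h1 : 1 ≤ i) :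
    pref arr i.toNat = pref arr (i - 1).toNat + arr.getD i.toNat 0 := by
  have h : i.toNat = (i - 1).toNat + 1 := by omega
  conv_lhs => rw [h]
  simp only [pref]
  rw [← h]

-- A's destructive prefix-sum scan returns the same answer as B's pure scan of cnt
theorem scanStep (n : Int) (arr1 cnt : List Int)
    (hcnt : ∀ i : Int, 1 ≤ i → i ≤ n → pref arr1 i.toNat = cnt.getD i.toNat 0) :
    ∀ (k : Nat) (i : Int), i = n + 1 - (k : Int) → 1 ≤ i →
      ∀ (arr : List Int) (ans s maxi : Int),
        (∀ j : Nat, i.toNat ≤ j → arr.getD j 0 = arr1.getD j 0) →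
        s = pref arr1 (i - 1).toNat →
        ((PySem.List.pyRange i (n + 1) 1).foldl stepScanA (arr, ans, s, maxi)).2.1
          = ((PySem.List.pyRange i (n + 1) 1).foldl (stepScanB cnt) (ans, maxi)).1 := by
  intro k
  induction k with
  | zero =>
      intro i hi _ arr ans s maxi _ _
      rw [PySem.List.pyRange_one_eq_nil (by omega : n + 1 ≤ i)]
      simp
  | succ k ih =>
      intro i hi h1 arr ans s maxi harr hs
      rw [PySem.List.pyRange_one_cons (by omega : i < n + 1)]
      simp only [List.foldl_cons]
      have hv : PySem.List.pyGetD arr i 0 + s = PySem.List.pyGetD cnt i 0 := by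
        rw [pyGetD_nonneg_getD arr i (by omega), harr i.toNat (le_refl _), hs,
            pyGetD_nonneg_getD cnt i (by omega)]
        rw [← hcnt i h1 (by omega)]
        rw [pref_succ arr1 i h1]
        ring
      have harr' : ∀ j : Nat, (i + 1).toNat ≤ j →
          (PySem.List.pySetD arr i (PySem.List.pyGetD cnt i 0)).getD j 0 = arr1.getD j 0 := by
        intro j hj
        rw [pySetD_eq_set arr i _ (by omega),
            getD_set_other arr i.toNat j _ (by omega)]
        exact harr j (by omega)
      have hs' : PySem.List.pyGetD cnt i 0 = pref arr1 ((i + 1) - 1).toNat := by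
        rw [pyGetD_nonneg_getD cnt i (by omega), ← hcnt i h1 (by omega)]
        congr 1
        omega
      simp only [stepScanA, stepScanB, hv]
      by_cases hgt : PySem.List.pyGetD cnt i 0 > maxi
      · rw [if_pos hgt, if_pos hgt]
        exact ih (i + 1) (by omega) (by omega) _ i _ _ harr' hs'
      · rw [if_neg hgt, if_neg hgt]
        exact ih (i + 1) (by omega) (by omega) _ ans _ maxi harr' hs'

-- ===== VERDICT (by name: the statement is the Claim_ definition above) =====
theorem getmostvisited_spec : Claim_equal_getmostvisited := by
  intro n sprints _ hpre
  unfold Spec_getmostvisited getmostvisited getmostvisited_alt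
  by_cases hn : 0 ≤ n
  · have hbounds : ∀ i ∈ PySem.List.pyRange 0 ((sprints.length : Int) - 1) 1,
        (1 ≤ PySem.List.pyGetD sprints i 0 ∧ PySem.List.pyGetD sprints i 0 ≤ n) ∧
        (1 ≤ PySem.List.pyGetD sprints (i+1) 0 ∧ PySem.List.pyGetD sprints (i+1) 0 ≤ n) := by
      intro i hi
      rw [PySem.List.mem_pyRange_one] at hi
      rcases hpre with hlen | ⟨_, hall⟩
      · exfalso; omega
      · have hmem : ∀ m : Int, 0 ≤ m → m < (sprints.length : Int) →
            1 ≤ PySem.List.pyGetD sprints m 0 ∧ PySem.List.pyGetD sprints m 0 ≤ n := by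
          intro m hm0 hmlen
          rw [pyGetD_nonneg_getD sprints m hm0]
          have hlt : m.toNat < sprints.length := by omega
          rw [List.getD_eq_getElem sprints 0 hlt]
          exact hall _ (List.getElem_mem hlt)
        exact ⟨hmem i (by omega) (by omega), hmem (i + 1) (by omega) (by omega)⟩
    have hcnt : ∀ r : Int, 1 ≤ r → r ≤ n →
        pref ((PySem.List.pyRange 0 ((sprints.length : Int) - 1) 1).foldl (stepDiff sprints)
                (List.replicate (n + 2).toNat 0)) r.toNat
          = ((PySem.List.pyRange 0 ((sprints.length : Int) - 1) 1).foldl (stepFill sprints)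
                (List.replicate (n + 2).toNat 0)).getD r.toNat 0 := by
      intro r hr1 hrn
      have := phase1 n sprints r hr1 hrn _ hbounds
        (List.replicate (n + 2).toNat 0) (List.replicate (n + 2).toNat 0)
        (by simp; omega) (by simp; omega)
      rw [pref_replicate] at this
      have hz : (List.replicate (n + 2).toNat (0 : Int)).getD r.toNat 0 = 0 := by
        simp [List.getD]
      rw [hz] at this
      linarith [this]
    exact scanStep n _ _ hcnt n.toNat 1 (by omega) (by omega) _ (-1) 0 (-1)
      (fun j _ => rfl) (by simp [pref])
  · rw [PySem.List.pyRange_one_eq_nil (by omega : n + 1 ≤ 1)]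
    simp
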